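-- pv_equiv track=rewrite | github.com/ebonian/compprog | examples/grader/9/Fill_In_Numbers.py | pattern5
-- ===== SOURCE A (Python) =====
-- def pattern5(N):
--     c=N
--     ans=[]
--     for i in range(N):
--         temp=[]
--         for j in range(N):
--             if j<i: temp.append(0)
--             elif i==0:
--                 if j!=0:
--                     temp.append(temp[j-1]+c)
--                     c-=1
--                 else: temp.append(1)
--             else:
--                 temp.append(ans[i-1][j-1]+1)
--         ans.append(temp)
--     return ans
-- ===== SOURCE B (Python) =====
-- def pattern5(N):
--     base = [1 + k * N - k * (k - 1) // 2 for k in range(N)]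
--     return [[0 if j < i else base[j - i] + i for j in range(N)] for i in range(N)]
-- ===== Notes on version B (the rewrite author's own statement) =====
-- stated objective: simpler
-- what changed: Replaces A's stateful double loop (decreasing counter c for row 0, each later row read cell-by-cell from the previous row via ans[i-1][j-1]+1) by a closed-form base row base[k] = 1 + k*N - k*(k-1)//2 and a nested comprehension cell = 0 if j < i else base[j-i] + i.
import Mathlib
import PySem

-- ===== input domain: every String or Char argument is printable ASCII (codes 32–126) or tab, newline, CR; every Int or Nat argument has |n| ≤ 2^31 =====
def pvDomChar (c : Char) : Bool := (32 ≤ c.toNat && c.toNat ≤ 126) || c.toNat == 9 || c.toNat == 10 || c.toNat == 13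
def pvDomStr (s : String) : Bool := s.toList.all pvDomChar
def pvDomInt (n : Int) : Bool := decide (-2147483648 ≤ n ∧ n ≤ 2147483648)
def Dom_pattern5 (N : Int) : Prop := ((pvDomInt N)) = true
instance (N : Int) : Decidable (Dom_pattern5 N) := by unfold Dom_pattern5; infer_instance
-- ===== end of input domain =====

-- B replaces A's row-from-previous-row recurrence by a closed-form base row plus a nested comprehension (objective: simpler).


-- ===== PORT A =====
-- inner 'for j in range(N)' loop body; state t = (c, temp); 'ans' is the outer list so far.
-- temp[j-1] and ans[i-1][j-1] are always in range when evaluated, so pyGetD's default is never used.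
def pattern5_inner (N i : Int) (ans : List (List Int)) (t : Int × List Int) (j : Int) : Int × List Int :=
  if j < i then (t.1, t.2 ++ [0])
  else if i == 0 then
    (if j != 0 then (t.1 - 1, t.2 ++ [PySem.List.pyGetD t.2 (j - 1) 0 + t.1])
     else (t.1, t.2 ++ [1]))
  else (t.1, t.2 ++ [PySem.List.pyGetD (PySem.List.pyGetD ans (i - 1) []) (j - 1) 0 + 1])

-- outer 'for i in range(N)' loop body; state s = (c, ans)
def pattern5_outer (N : Int) (s : Int × List (List Int)) (i : Int) : Int × List (List Int) :=
  let t := (PySem.List.pyRange 0 N 1).foldl (pattern5_inner N i s.2) (s.1, [])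
  (t.1, s.2 ++ [t.2])

def pattern5 (N : Int) : List (List Int) :=
  ((PySem.List.pyRange 0 N 1).foldl (pattern5_outer N) (N, [])).2

-- ===== PORT B =====
-- base[k] = 1 + k*N - k*(k-1)//2
def pattern5_base (N : Int) : List Int :=
  (PySem.List.pyRange 0 N 1).map (fun k => 1 + k * N - PySem.Int.floordiv (k * (k - 1)) 2)

def pattern5_row (N i : Int) : List Int :=
  (PySem.List.pyRange 0 N 1).map (fun j =>
    if j < i then 0 else PySem.List.pyGetD (pattern5_base N) (j - i) 0 + i)

def pattern5_alt (N : Int) : List (List Int) :=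
  (PySem.List.pyRange 0 N 1).map (fun i => pattern5_row N i)

-- ===== PRECONDITION & SPEC =====
def Spec_pattern5 (N : Int) (out : List (List Int)) : Prop := out = pattern5_alt N
instance (N : Int) (out : List (List Int)) : Decidable (Spec_pattern5 N out) := by unfold Spec_pattern5; infer_instance

-- ===== CLAIM (what is proved, stated in full; the proofs are below) =====
def Claim_equal_pattern5 : Prop := ∀ (N : Int), Dom_pattern5 N → Spec_pattern5 N (pattern5 N)

-- ===== LEMMAS AND PROOFS =====

-- base value abbreviation (proof-side only)
def pvBase (N k : Int) : Int := 1 + k * N - PySem.Int.floordiv (k * (k - 1)) 2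

lemma pvBase_step (N m : Int) : pvBase N (m - 1) + (N - m + 1) = pvBase N m := by
  simp only [pvBase, PySem.Int.floordiv_eq_ediv_of_pos (by norm_num : (0:Int) < 2)]
  have h : m * (m - 1) = (m - 1) * (m - 1 - 1) + (m - 1) * 2 := by ring
  rw [h, Int.add_mul_ediv_right _ _ (by norm_num : (2:Int) ≠ 0)]
  ring

lemma pyGetD_base (N j : Int) (h0 : 0 ≤ j) (h1 : j < N) :
    PySem.List.pyGetD (pattern5_base N) j 0 = pvBase N j := by
  unfold pattern5_base
  rw [PySem.List.pyGetD_map_pyRange_of_nonneg _ N j 0 h0 h1]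
  rfl

-- row 0: the inner loop computes the base row, ending with c = N - m + 1
lemma pattern5_inner_zero (N : Int) (ans : List (List Int)) (m : Nat) (h1 : 1 ≤ m)
    (h2 : (m : Int) ≤ N) :
    (PySem.List.pyRange 0 (m : Int) 1).foldl (pattern5_inner N 0 ans) (N, []) =
      (N - m + 1, (PySem.List.pyRange 0 (m : Int) 1).map (pvBase N)) := by
  induction m with
  | zero => omega
  | succ m ih =>
    rcases Nat.eq_or_lt_of_le h1 with h | h
    · -- m + 1 = 1
      have : m = 0 := by omega
      subst this
      have h01 : PySem.List.pyRange 0 (((0:Nat)+1 : Nat) : Int) 1 = [0] := by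
        norm_num [PySem.List.pyRange_one]
      rw [h01]
      simp only [List.foldl_cons, List.foldl_nil, List.map_cons, List.map_nil]
      unfold pattern5_inner pvBase
      norm_num [PySem.Int.floordiv_eq_ediv_of_pos]
    · have hm1 : 1 ≤ m := by omega
      have hmN : (m : Int) ≤ N := by push_cast at h2; omega
      have hsplit : PySem.List.pyRange 0 ((m : Int) + 1) 1 =
          PySem.List.pyRange 0 (m : Int) 1 ++ [(m : Int)] :=
        PySem.List.pyRange_one_succ_right (by omega)
      rw [show (((m + 1 : Nat)) : Int) = (m : Int) + 1 by push_cast; ring, hsplit,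
        List.foldl_append, ih hm1 hmN]
      simp only [List.foldl_cons, List.foldl_nil, List.map_append, List.map_cons, List.map_nil]
      unfold pattern5_inner
      have hnotlt : ¬ ((m : Int) < 0) := by omega
      have hne : ((m : Int) != 0) = true := by
        simp; omega
      simp only [hnotlt, if_false, beq_self_eq_true, if_true, hne]
      have hget : PySem.List.pyGetD ((PySem.List.pyRange 0 (m : Int) 1).map (pvBase N))
          ((m : Int) - 1) 0 = pvBase N ((m : Int) - 1) :=
        PySem.List.pyGetD_map_pyRange_of_nonneg _ (m : Int) ((m : Int) - 1) 0
          (by omega) (by omega)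
      rw [hget, pvBase_step N (m : Int)]
      simp only [Prod.mk.injEq]
      exact ⟨by ring, trivial⟩

-- row i ≥ 1: the inner loop maps an independent function over the range, c unchanged
lemma pattern5_inner_pos (N i : Int) (ans : List (List Int)) (hi : 1 ≤ i) (c : Int) :
    (PySem.List.pyRange 0 N 1).foldl (pattern5_inner N i ans) (c, []) =
      (c, (PySem.List.pyRange 0 N 1).map (fun j =>
        if j < i then 0 else PySem.List.pyGetD (PySem.List.pyGetD ans (i - 1) []) (j - 1) 0 + 1)) := by
  have hrw : (PySem.List.pyRange 0 N 1).foldl (pattern5_inner N i ans) (c, []) =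
      (PySem.List.pyRange 0 N 1).foldl (fun (t : Int × List Int) j =>
        (t.1, t.2 ++ [if j < i then 0
          else PySem.List.pyGetD (PySem.List.pyGetD ans (i - 1) []) (j - 1) 0 + 1])) (c, []) := by
    apply PySem.List.foldl_congr_mem
    intro t j _
    unfold pattern5_inner
    have : (i == 0) = false := by simp; omega
    by_cases h : j < i <;> simp [h, this]
  rw [hrw,
    PySem.List.foldl_prod_mk (f := fun (a : Int) (_ : Int) => a)
      (g := fun (acc : List Int) j => acc ++ [if j < i then 0
        else PySem.List.pyGetD (PySem.List.pyGetD ans (i - 1) []) (j - 1) 0 + 1]),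
    PySem.List.foldl_ignore, PySem.List.foldl_append_singleton_eq_map]
  simp

-- outer loop invariant
lemma pattern5_outer_inv (N : Int) (hN : 1 ≤ N) (m : Nat) (h2 : (m : Int) ≤ N) :
    (PySem.List.pyRange 0 (m : Int) 1).foldl (pattern5_outer N) (N, []) =
      (if m = 0 then N else 1, (PySem.List.pyRange 0 (m : Int) 1).map (pattern5_row N)) := by
  induction m with
  | zero => simp [PySem.List.pyRange_one_eq_nil]
  | succ m ih =>
    have hmN : (m : Int) ≤ N := by push_cast at h2; omega
    have hsplit : PySem.List.pyRange 0 ((m : Int) + 1) 1 =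
        PySem.List.pyRange 0 (m : Int) 1 ++ [(m : Int)] :=
      PySem.List.pyRange_one_succ_right (by omega)
    rw [show (((m + 1 : Nat)) : Int) = (m : Int) + 1 by push_cast; ring, hsplit,
      List.foldl_append, ih hmN]
    simp only [List.foldl_cons, List.foldl_nil, List.map_append, List.map_cons, List.map_nil]
    rcases Nat.eq_zero_or_pos m with hm | hm
    · -- row 0
      subst hm
      simp only [if_true, Nat.cast_zero]
      unfold pattern5_outer
      have h0 := pattern5_inner_zero N [] N.toNat (by omega) (by omega)
      rw [Int.toNat_of_nonneg (by omega : (0:Int) ≤ N)] at h0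
      simp only [PySem.List.pyRange_one_eq_nil (le_refl (0:Int)), List.map_nil]
      simp only [h0, List.nil_append, Prod.mk.injEq]
      refine ⟨by norm_num, ?_⟩
      norm_num
      -- base row = pattern5_row N 0
      unfold pattern5_row
      apply List.map_congr_left
      intro j hj
      rw [PySem.List.mem_pyRange_one] at hj
      have : ¬ (j < 0) := by omega
      simp only [this, if_false, sub_zero, add_zero]
      rw [pyGetD_base N j (by omega) (by omega)]
    · -- row m ≥ 1
      have hm1 : (1 : Int) ≤ (m : Int) := by exact_mod_cast hm
      simp only [Nat.pos_iff_ne_zero.mp hm, if_false]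
      unfold pattern5_outer
      rw [pattern5_inner_pos N (m : Int) _ hm1 1]
      simp only [Prod.mk.injEq]
      refine ⟨rfl, ?_⟩
      congr 1
      simp only [List.cons.injEq, and_true]
      -- the produced row equals pattern5_row N m
      rw [show pattern5_row N (m : Int) = (PySem.List.pyRange 0 N 1).map (fun j =>
        if j < (m : Int) then 0
        else PySem.List.pyGetD (pattern5_base N) (j - (m : Int)) 0 + (m : Int)) from rfl]
      apply List.map_congr_left
      intro j hj
      rw [PySem.List.mem_pyRange_one] at hj
      by_cases hlt : j < (m : Int)
      · simp [hlt]
      · simp only [hlt, if_false]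
        have hprev : PySem.List.pyGetD ((PySem.List.pyRange 0 (m : Int) 1).map (pattern5_row N))
            ((m : Int) - 1) [] = pattern5_row N ((m : Int) - 1) :=
          PySem.List.pyGetD_map_pyRange_of_nonneg _ (m : Int) ((m : Int) - 1) []
            (by omega) (by omega)
        rw [hprev, show pattern5_row N ((m : Int) - 1) = (PySem.List.pyRange 0 N 1).map (fun j' =>
          if j' < (m : Int) - 1 then 0
          else PySem.List.pyGetD (pattern5_base N) (j' - ((m : Int) - 1)) 0 + ((m : Int) - 1)) from rfl]
        have hin := PySem.List.pyGetD_map_pyRange_of_nonneg (fun j' =>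
          if j' < (m : Int) - 1 then 0
          else PySem.List.pyGetD (pattern5_base N) (j' - ((m : Int) - 1)) 0 + ((m : Int) - 1))
          N (j - 1) 0 (by omega) (by omega)
        rw [hin]
        have h1 : ¬ (j - 1 < (m : Int) - 1) := by omega
        simp only [h1, if_false]
        have h2 : (j - 1) - ((m : Int) - 1) = j - (m : Int) := by ring
        rw [h2]
        ring

-- ===== VERDICT (by name: the statement is the Claim_ definition above) =====
theorem pattern5_spec : Claim_equal_pattern5 := by
  intro N _
  unfold Spec_pattern5 pattern5 pattern5_alt
  by_cases hN : N ≤ 0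
  · simp [PySem.List.pyRange_one_eq_nil (by omega : N ≤ 0)]
  · have hNtoNat : ((N.toNat : Nat) : Int) = N := Int.toNat_of_nonneg (by omega)
    have := pattern5_outer_inv N (by omega) N.toNat (by omega)
    rw [hNtoNat] at this
    rw [this]
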